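-- pv_equiv track=rewrite | github.com/BenAAndrew/speech-transcriber | audio.py | combine_clips
-- ===== SOURCE A (Python) =====
-- from typing import List
--
-- def combine_clips(clip_ranges: List[List[int]], max_clip_length: int):
--     for i in range(1, len(clip_ranges)):
--         start = clip_ranges[i-1][0]
--         end = clip_ranges[i][1]
--         duration = end - start
--         if duration <= max_clip_length:
--             clip_ranges[i-1] = [start, end]
--             del clip_ranges[i]
--             return combine_clips(clip_ranges, max_clip_length)
--
--     return clip_ranges
-- ===== SOURCE B (Python) =====
-- # Single forward pass with a stack: instead of rescanning from the start after
-- # every merge (A's recursion), push clips and pop-merge while the new clip can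
-- # absorb the stack top.  Return value only: A mutates clip_ranges in place, B does not.
-- def combine_clips(clip_ranges, max_clip_length):
--     stack = []
--     for clip in clip_ranges:
--         cur = clip
--         while stack and cur[1] - stack[-1][0] <= max_clip_length:
--             top = stack.pop()
--             cur = [top[0], cur[1]]
--         stack.append(cur)
--     return stack
-- ===== Notes on version B (the rewrite author's own statement) =====
-- stated objective: alternative
-- what changed: A rescans from index 1 and recurses after every single merge; B does one left-to-right pass with a stack, pop-merging the top while the incoming clip fits, so no restart ever happens (avoids A's quadratic worst case on merge-heavy input; not measurably faster on random input).
import Mathlib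
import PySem

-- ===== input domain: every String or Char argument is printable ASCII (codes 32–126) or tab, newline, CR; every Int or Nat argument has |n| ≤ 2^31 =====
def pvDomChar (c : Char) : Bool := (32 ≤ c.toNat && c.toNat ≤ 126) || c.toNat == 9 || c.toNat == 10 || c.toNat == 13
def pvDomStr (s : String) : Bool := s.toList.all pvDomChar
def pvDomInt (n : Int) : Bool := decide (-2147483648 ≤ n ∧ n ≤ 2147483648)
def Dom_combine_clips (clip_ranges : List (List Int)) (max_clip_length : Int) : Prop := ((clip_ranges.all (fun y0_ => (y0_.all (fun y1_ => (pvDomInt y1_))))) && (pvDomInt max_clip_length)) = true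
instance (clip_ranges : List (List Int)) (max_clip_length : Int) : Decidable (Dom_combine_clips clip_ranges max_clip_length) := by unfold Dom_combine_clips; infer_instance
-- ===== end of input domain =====

-- B replaces A's restart-after-every-merge recursion by a single forward pass with a stack.
-- Return value only: Python A mutates clip_ranges in place, B does not.

-- ===== PORT A =====
-- A's `for i in range(1, len(l))` scanning for the first mergeable adjacent pair; returns its index.
-- Inner-list reads use getD defaults; inside Pre_ (where Python does not raise) they are the real elements.
def findMerge (l : List (List Int)) (m : Int) (i : Nat) : Option Nat :=
  if i < l.length then
    if (l.getD i []).getD 1 0 - (l.getD (i-1) []).getD 0 0 ≤ m then some i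
    else findMerge l m (i+1)
  else none
termination_by l.length - i

-- `clip_ranges[i-1] = [start, end]; del clip_ranges[i]`
def mergeAt (l : List (List Int)) (i : Nat) : List (List Int) :=
  let s := (l.getD (i-1) []).getD 0 0
  let e := (l.getD i []).getD 1 0
  (l.set (i-1) [s, e]).eraseIdx i

-- termination lemma for the port's recursion (cited in decreasing_by)
theorem findMerge_lt {l : List (List Int)} {m : Int} {i j : Nat}
    (h : findMerge l m i = some j) : j < l.length := by
  fun_induction findMerge l m i with
  | case1 i hi hc => exact (Option.some.inj h.symm) ▸ hi
  | case2 i hi hc ih => exact ih h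
  | case3 i hi => simp at h

def combine_clips (clip_ranges : List (List Int)) (max_clip_length : Int) : List (List Int) :=
  match h : findMerge clip_ranges max_clip_length 1 with
  | some i => combine_clips (mergeAt clip_ranges i) max_clip_length
  | none => clip_ranges
termination_by clip_ranges.length
decreasing_by
  have hlt := findMerge_lt h
  simp [mergeAt, List.length_eraseIdx, List.length_set, hlt]
  omega

-- ===== PORT B =====
-- `while stack and cur[1] - stack[-1][0] <= max_clip_length: top = stack.pop(); cur = [top[0], cur[1]]`
-- the stack is held top-first; the final stack is reversed back into list order.
def popMerge (m : Int) (stack : List (List Int)) (cur : List Int) : List (List Int) :=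
  match stack with
  | [] => [cur]
  | t :: rest =>
    if cur.getD 1 0 - t.getD 0 0 ≤ m then popMerge m rest [t.getD 0 0, cur.getD 1 0]
    else cur :: t :: rest

def combine_clips_alt (clip_ranges : List (List Int)) (max_clip_length : Int) : List (List Int) :=
  (clip_ranges.foldl (popMerge max_clip_length) []).reverse

-- ===== PRECONDITION & SPEC =====
-- Pre_ excludes exactly the inputs on which Python A raises IndexError: with ≥ 2 clips,
-- an empty first inner list or a later inner list with fewer than 2 elements.
def Pre_combine_clips (clip_ranges : List (List Int)) (max_clip_length : Int) : Prop :=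
  clip_ranges.length ≤ 1 ∨
    (1 ≤ (clip_ranges.headD []).length ∧ ∀ c ∈ clip_ranges.tail, 2 ≤ c.length)
instance (clip_ranges : List (List Int)) (max_clip_length : Int) : Decidable (Pre_combine_clips clip_ranges max_clip_length) := by unfold Pre_combine_clips; infer_instance
def pvWitness_combine_clips : List (List Int) × Int := ([[0, 3], [4, 9], [20, 23]], 10)

def Spec_combine_clips (clip_ranges : List (List Int)) (max_clip_length : Int) (out : List (List Int)) : Prop := out = combine_clips_alt clip_ranges max_clip_length
instance (clip_ranges : List (List Int)) (max_clip_length : Int) (out : List (List Int)) : Decidable (Spec_combine_clips clip_ranges max_clip_length out) := by unfold Spec_combine_clips; infer_instance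

-- ===== CLAIM (what is proved, stated in full; the proofs are below) =====
def Claim_equal_combine_clips : Prop := ∀ (clip_ranges : List (List Int)) (max_clip_length : Int), Dom_combine_clips clip_ranges max_clip_length → Pre_combine_clips clip_ranges max_clip_length → Spec_combine_clips clip_ranges max_clip_length (combine_clips clip_ranges max_clip_length)

-- ===== LEMMAS AND PROOFS =====

-- the merge condition A tests at index k
def pvCond (l : List (List Int)) (m : Int) (k : Nat) : Prop :=
  (l.getD k []).getD 1 0 - (l.getD (k-1) []).getD 0 0 ≤ m

-- adjacent failure relation used for the stack invariant
def failR (m : Int) (x y : List Int) : Prop := ¬ (y.getD 1 0 - x.getD 0 0 ≤ m)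

theorem findMerge_some_spec {l : List (List Int)} {m : Int} {i j : Nat}
    (h : findMerge l m i = some j) :
    i ≤ j ∧ j < l.length ∧ pvCond l m j ∧ ∀ k, i ≤ k → k < j → ¬ pvCond l m k := by
  fun_induction findMerge l m i with
  | case1 i hi hc =>
    cases Option.some.inj h.symm
    exact ⟨le_rfl, hi, hc, fun k hk1 hk2 => absurd hk1 (by omega)⟩
  | case2 i hi hc ih =>
    obtain ⟨h1, h2, h3, h4⟩ := ih h
    refine ⟨by omega, h2, h3, fun k hk1 hk2 => ?_⟩
    rcases Nat.eq_or_lt_of_le hk1 with rfl | hk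
    · exact hc
    · exact h4 k hk hk2
  | case3 i hi => simp at h

theorem findMerge_none_spec {l : List (List Int)} {m : Int} {i : Nat}
    (h : findMerge l m i = none) :
    ∀ k, i ≤ k → k < l.length → ¬ pvCond l m k := by
  fun_induction findMerge l m i with
  | case1 i hi hc => simp at h
  | case2 i hi hc ih =>
    intro k hk1 hk2
    rcases Nat.eq_or_lt_of_le hk1 with rfl | hk
    · exact hc
    · exact ih h k hk hk2
  | case3 i hi => intro k hk1 hk2; omega

-- no mergeable adjacent pair at any k ∈ [1, j) ⇒ the first j clips are chainwise unmergeable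
theorem chain_of_nofail {l : List (List Int)} {m : Int} {j : Nat}
    (hj : j ≤ l.length)
    (h : ∀ k, 1 ≤ k → k < j → ¬ pvCond l m k) :
    List.IsChain (failR m) (l.take j) := by
  rw [List.isChain_iff_getElem]
  intro k hk
  have hlen : (l.take j).length = j := by simp [List.length_take]; omega
  rw [hlen] at hk
  have h1 : k < l.length := by omega
  have h2 : k + 1 < l.length := by omega
  have e1 : (l.take j)[k]'(by omega) = l[k] := List.getElem_take
  have e2 : (l.take j)[k+1]'(by omega) = l[k+1] := List.getElem_take
  rw [e1, e2]
  have := h (k+1) (by omega) (by omega)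
  unfold pvCond at this
  unfold failR
  simpa [List.getD_eq_getElem, h1, h2] using this

-- folding the stack step over an unmergeable chain just reverses it
theorem foldl_popMerge_chain {m : Int} {P : List (List Int)}
    (h : List.IsChain (failR m) P) :
    P.foldl (popMerge m) [] = P.reverse := by
  induction P using List.reverseRecOn with
  | nil => rfl
  | append_singleton Q x ih =>
    have hq : List.IsChain (failR m) Q := (List.isChain_append.mp h).1
    rw [List.foldl_append, ih hq]
    simp only [List.foldl_cons, List.foldl_nil, List.reverse_append, List.reverse_singleton,
      List.singleton_append]
    cases hrq : Q.reverse with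
    | nil => simp at hrq; subst hrq; rfl
    | cons t rest =>
      have hlast : Q.getLast? = some t := by
        rw [← List.head?_reverse, hrq]; rfl
      have hfail : failR m t x := by
        have := (List.isChain_append.mp h).2.2
        exact this t hlast x rfl
      unfold failR at hfail
      simp only [popMerge]
      rw [if_neg (by simpa using hfail)]

-- generic list surgery: A's set + eraseIdx on the decomposed list
theorem set_eraseIdx_decomp (T : List (List Int)) (a b : List Int) (S : List (List Int)) (x : List Int) :
    ((T ++ a :: b :: S).set T.length x).eraseIdx (T.length + 1) = T ++ x :: S := by
  induction T with
  | nil => rfl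
  | cons h t ih => simpa [List.set, List.eraseIdx] using ih

-- the heart of the proof: merging the first mergeable pair does not change B's fold
theorem alt_fold_merge {m : Int} (T : List (List Int)) (a b : List Int) (S : List (List Int))
    (hchain : List.IsChain (failR m) (T ++ [a]))
    (hcond : b.getD 1 0 - a.getD 0 0 ≤ m) :
    (T ++ a :: b :: S).foldl (popMerge m) [] =
      (T ++ (([a.getD 0 0, b.getD 1 0] : List Int) :: S)).foldl (popMerge m) [] := by
  have hT : List.IsChain (failR m) T := (List.isChain_append.mp hchain).1
  have lhs : (T ++ a :: b :: S) = (T ++ [a]) ++ b :: S := by simp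
  rw [lhs, List.foldl_append, foldl_popMerge_chain hchain]
  have rhs : (T ++ ([a.getD 0 0, b.getD 1 0] : List Int) :: S) = T ++ (([a.getD 0 0, b.getD 1 0] : List Int) :: S) := rfl
  rw [List.foldl_append, foldl_popMerge_chain hT]
  simp only [List.reverse_append, List.reverse_singleton, List.singleton_append, List.foldl_cons]
  rw [show popMerge m (a :: T.reverse) b = popMerge m T.reverse [a.getD 0 0, b.getD 1 0] by
    simp only [popMerge]; rw [if_pos hcond]]

theorem getD_append_len (T : List (List Int)) (a : List Int) (S : List (List Int)) :
    (T ++ a :: S).getD T.length [] = a := by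
  induction T with
  | nil => rfl
  | cons h t ih => simpa using ih

theorem getD_append_len1 (T : List (List Int)) (a b : List Int) (S : List (List Int)) :
    (T ++ a :: b :: S).getD (T.length + 1) [] = b := by
  have := getD_append_len (T ++ [a]) b S
  simp only [List.length_append, List.length_cons, List.length_nil, Nat.zero_add] at this
  simpa using this

-- A's in-place merge step on the decomposed list
theorem mergeAt_decomp (T : List (List Int)) (a b : List Int) (S : List (List Int)) (i : Nat)
    (hT : T.length + 1 = i) :
    mergeAt (T ++ a :: b :: S) i = T ++ ([a.getD 0 0, b.getD 1 0] : List Int) :: S := by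
  subst hT
  simp only [mergeAt, Nat.add_sub_cancel, getD_append_len, getD_append_len1]
  exact set_eraseIdx_decomp T a b S _

-- l split around positions i-1, i
theorem list_decomp {l : List (List Int)} {i : Nat} (h1 : 1 ≤ i) (h2 : i < l.length) :
    l = l.take (i-1) ++ (l.getD (i-1) []) :: (l.getD i []) :: l.drop (i+1) := by
  have hi1 : i - 1 < l.length := by omega
  have hd1 : l.drop (i-1) = l[i-1] :: l.drop i := by
    rw [List.drop_eq_getElem_cons hi1, show i - 1 + 1 = i by omega]
  have hd2 : l.drop i = l[i] :: l.drop (i+1) := List.drop_eq_getElem_cons h2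
  conv_lhs => rw [← List.take_append_drop (i-1) l]
  rw [hd1, hd2, List.getD_eq_getElem l [] hi1, List.getD_eq_getElem l [] h2]

theorem take_split {l : List (List Int)} {i : Nat} (h1 : 1 ≤ i) (h2 : i < l.length) :
    l.take i = l.take (i-1) ++ [l.getD (i-1) []] := by
  have hi1 : i - 1 < l.length := by omega
  rw [show i = (i-1) + 1 by omega, List.take_add_one]
  simp [List.getElem?_eq_getElem hi1]

theorem AB_eq (l : List (List Int)) (m : Int) :
    combine_clips l m = combine_clips_alt l m := by
  fun_induction combine_clips l m with
  | case1 l i h ih =>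
    rw [ih]
    obtain ⟨h1, h2, hc, hmin⟩ := findMerge_some_spec h
    have hdec := list_decomp h1 h2
    have hTlen : (l.take (i-1)).length = i - 1 := by
      rw [List.length_take]
      omega
    have hmerge : mergeAt l i =
        l.take (i-1) ++ ([(l.getD (i-1) []).getD 0 0, (l.getD i []).getD 1 0] : List Int) :: l.drop (i+1) := by
      conv_lhs => rw [hdec]
      exact mergeAt_decomp _ _ _ _ i (by omega)
    unfold combine_clips_alt
    congr 1
    unfold pvCond at hc
    have hchain : List.IsChain (failR m) (l.take i) :=
      chain_of_nofail (by omega) (fun k hk1 hk2 => hmin k hk1 hk2)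
    rw [take_split h1 h2] at hchain
    rw [hmerge]
    conv_rhs => rw [hdec]
    exact (alt_fold_merge (l.take (i-1)) (l.getD (i-1) []) (l.getD i []) (l.drop (i+1)) hchain hc).symm
  | case2 l h =>
    unfold combine_clips_alt
    have hchain : List.IsChain (failR m) l := by
      have := chain_of_nofail (le_refl l.length) (fun k hk1 hk2 => findMerge_none_spec h k hk1 hk2)
      simpa using this
    rw [foldl_popMerge_chain hchain, List.reverse_reverse]

-- ===== VERDICT (by name: the statement is the Claim_ definition above) =====
theorem combine_clips_spec : Claim_equal_combine_clips := by
  intro l m _ _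
  unfold Spec_combine_clips
  exact AB_eq l m
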